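-- pv_equiv track=rewrite | github.com/shohart/Docker-XRAY-proxy | scripts/compose_xray_config.py | reorder_outbounds
-- ===== SOURCE A (Python) =====
-- def reorder_outbounds(outbounds: list[dict]) -> list[dict]:
--     proxy = []
--     direct = []
--     block = []
--     other = []
--     for o in outbounds:
--         tag = o.get("tag")
--         proto = o.get("protocol")
--         if tag == "direct" or proto == "freedom":
--             direct.append(o)
--         elif tag == "block" or proto == "blackhole":
--             block.append(o)
--         elif proto == "dns":
--             other.append(o)
--         else:
--             proxy.append(o)
--
--     if not proxy:
--         raise ValueError("No proxy outbounds found in source config")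
--     return proxy + other + direct + block
-- ===== SOURCE B (Python) =====
-- def reorder_outbounds(outbounds: list[dict]) -> list[dict]:
--     def classify(o):
--         tag = o.get("tag")
--         proto = o.get("protocol")
--         if tag == "direct" or proto == "freedom":
--             return 2
--         if tag == "block" or proto == "blackhole":
--             return 3
--         if proto == "dns":
--             return 1
--         return 0
--
--     if not any(classify(o) == 0 for o in outbounds):
--         raise ValueError("No proxy outbounds found in source config")
--     return sorted(outbounds, key=classify)
-- ===== Notes on version B (the rewrite author's own statement) =====
-- stated objective: idiomatic
-- what changed: Replaces the four explicit accumulator lists and concatenation with a single stable sort by an integer priority key (proxy=0, other=1, direct=2, block=3); stability preserves input order within each category.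
import Mathlib
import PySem

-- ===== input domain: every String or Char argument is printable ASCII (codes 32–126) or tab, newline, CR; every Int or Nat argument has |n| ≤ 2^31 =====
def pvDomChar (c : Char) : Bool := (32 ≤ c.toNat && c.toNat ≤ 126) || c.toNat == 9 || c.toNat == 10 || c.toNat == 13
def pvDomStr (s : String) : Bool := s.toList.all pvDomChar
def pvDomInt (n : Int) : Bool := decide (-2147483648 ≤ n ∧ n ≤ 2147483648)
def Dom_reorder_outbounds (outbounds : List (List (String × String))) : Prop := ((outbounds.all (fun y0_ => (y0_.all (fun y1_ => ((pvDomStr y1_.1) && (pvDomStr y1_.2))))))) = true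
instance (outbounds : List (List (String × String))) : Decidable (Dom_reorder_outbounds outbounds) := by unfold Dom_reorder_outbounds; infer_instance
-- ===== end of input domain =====

-- B replaces A's four accumulator lists with a single stable sort by an integer
-- priority key (idiomatic; not faster — A is a single linear pass already).

-- ===== PORT A =====
def reorder_outbounds (outbounds : List (List (String × String))) : List (List (String × String)) :=
  let st := outbounds.foldl
    (fun (st : List (List (String × String)) × List (List (String × String)) ×
               List (List (String × String)) × List (List (String × String))) o =>
      let (proxy, direct, block, other) := st
      let tag := (PySem.Dict.mk o).get? "tag"
      let proto := (PySem.Dict.mk o).get? "protocol"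
      if tag == some "direct" || proto == some "freedom" then (proxy, direct ++ [o], block, other)
      else if tag == some "block" || proto == some "blackhole" then (proxy, direct, block ++ [o], other)
      else if proto == some "dns" then (proxy, direct, block, other ++ [o])
      else (proxy ++ [o], direct, block, other))
    ([], [], [], [])
  if st.1 = [] then []  -- Python raises ValueError here; excluded by Pre_
  else st.1 ++ st.2.2.2 ++ st.2.1 ++ st.2.2.1

-- ===== PORT B =====
-- B-side helper: the priority key (proxy=0, other=1, direct=2, block=3)
def pvClassify (o : List (String × String)) : Int :=
  let tag := (PySem.Dict.mk o).get? "tag"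
  let proto := (PySem.Dict.mk o).get? "protocol"
  if tag == some "direct" || proto == some "freedom" then 2
  else if tag == some "block" || proto == some "blackhole" then 3
  else if proto == some "dns" then 1
  else 0

def reorder_outbounds_alt (outbounds : List (List (String × String))) : List (List (String × String)) :=
  if outbounds.any (fun o => pvClassify o == 0) then
    PySem.List.sorted outbounds pvClassify false
  else []  -- Python raises ValueError here; excluded by Pre_

-- ===== PRECONDITION & SPEC =====
-- Pre_: some outbound classifies as proxy; otherwise the Python (both A and B) raises ValueError.
def Pre_reorder_outbounds (outbounds : List (List (String × String))) : Prop :=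
  outbounds.any (fun o => pvClassify o == 0) = true
instance (outbounds : List (List (String × String))) : Decidable (Pre_reorder_outbounds outbounds) := by
  unfold Pre_reorder_outbounds; infer_instance

def pvWitness_reorder_outbounds : (List (List (String × String))) := [[("tag", "proxy")]]

def Spec_reorder_outbounds (outbounds : List (List (String × String))) (out : List (List (String × String))) : Prop := out = reorder_outbounds_alt outbounds
instance (outbounds : List (List (String × String))) (out : List (List (String × String))) : Decidable (Spec_reorder_outbounds outbounds out) := by unfold Spec_reorder_outbounds; infer_instance

-- ===== CLAIM (what is proved, stated in full; the proofs are below) =====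
def Claim_equal_reorder_outbounds : Prop := ∀ (outbounds : List (List (String × String))), Dom_reorder_outbounds outbounds → Pre_reorder_outbounds outbounds → Spec_reorder_outbounds outbounds (reorder_outbounds outbounds)

-- ===== LEMMAS AND PROOFS =====

-- the elements of a given priority class, in input order
def pvF (k : Int) (xs : List (List (String × String))) : List (List (String × String)) :=
  xs.filter (fun o => pvClassify o == k)

theorem pvClassify_range (o : List (String × String)) :
    pvClassify o = 0 ∨ pvClassify o = 1 ∨ pvClassify o = 2 ∨ pvClassify o = 3 := by
  simp only [pvClassify]; split_ifs <;> simp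

theorem mem_pvF (k : Int) (xs : List (List (String × String))) (a : List (String × String))
    (h : a ∈ pvF k xs) : pvClassify a = k := by
  have := List.of_mem_filter h
  simpa using this

-- A's loop invariant: the four accumulators are the four priority classes
theorem pvA_loop (xs : List (List (String × String)))
    (p d b o : List (List (String × String))) :
    xs.foldl
      (fun (st : List (List (String × String)) × List (List (String × String)) ×
                 List (List (String × String)) × List (List (String × String))) o =>
        let (proxy, direct, block, other) := st
        let tag := (PySem.Dict.mk o).get? "tag"
        let proto := (PySem.Dict.mk o).get? "protocol"
        if tag == some "direct" || proto == some "freedom" then (proxy, direct ++ [o], block, other)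
        else if tag == some "block" || proto == some "blackhole" then (proxy, direct, block ++ [o], other)
        else if proto == some "dns" then (proxy, direct, block, other ++ [o])
        else (proxy ++ [o], direct, block, other))
      (p, d, b, o)
    = (p ++ pvF 0 xs, d ++ pvF 2 xs, b ++ pvF 3 xs, o ++ pvF 1 xs) := by
  induction xs generalizing p d b o with
  | nil => simp [pvF]
  | cons x xs ih =>
    simp only [List.foldl_cons]
    by_cases h1 : ((PySem.Dict.mk x).get? "tag" == some "direct" || (PySem.Dict.mk x).get? "protocol" == some "freedom") = true
    · have hc : pvClassify x = 2 := by unfold pvClassify; simp only [h1]; simp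
      simp only [h1, if_pos, ih]
      simp [pvF, hc]
    · by_cases h2 : ((PySem.Dict.mk x).get? "tag" == some "block" || (PySem.Dict.mk x).get? "protocol" == some "blackhole") = true
      · have hc : pvClassify x = 3 := by
          unfold pvClassify
          simp only [Bool.not_eq_true] at h1
          simp [h1, h2]
        simp only [Bool.not_eq_true] at h1
        simp only [h1, h2, ih]
        simp [pvF, hc]
      · by_cases h3 : ((PySem.Dict.mk x).get? "protocol" == some "dns") = true
        · have hc : pvClassify x = 1 := by
            unfold pvClassify
            simp only [Bool.not_eq_true] at h1 h2
            simp [h1, h2, h3]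
          simp only [Bool.not_eq_true] at h1 h2
          simp only [h1, h2, h3, ih]
          simp [pvF, hc]
        · have hc : pvClassify x = 0 := by
            unfold pvClassify
            simp only [Bool.not_eq_true] at h1 h2 h3
            simp [h1, h2, h3]
          simp only [Bool.not_eq_true] at h1 h2 h3
          simp only [h1, h2, h3, ih]
          simp [pvF, hc]

-- insertion into as ++ bs, where x goes after all of as and before all of bs
theorem pvInsertBy_split (before : List (String × String) → List (String × String) → Bool)
    (x : List (String × String)) (as bs : List (List (String × String)))
    (h1 : ∀ a ∈ as, before x a = false) (h2 : ∀ b ∈ bs, before x b = true) :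
    PySem.List.insertBy before x (as ++ bs) = as ++ x :: bs := by
  induction as with
  | nil =>
    cases bs with
    | nil => simpa using PySem.List.insertBy_of_forall_not_before before x [] (by simp)
    | cons b bs =>
      have := h2 b (by simp)
      simp [PySem.List.insertBy, this]
  | cons a as ih =>
    have ha := h1 a (by simp)
    simp only [List.cons_append, PySem.List.insertBy, ha]
    simp only [Bool.false_eq_true, if_false, List.cons.injEq, true_and]
    exact ih (fun a' h' => h1 a' (by simp [h'])) 

-- the stable sort by priority is exactly the four classes concatenated
theorem pvSorted_eq_filters (xs : List (List (String × String))) :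
    PySem.List.sorted xs pvClassify false = pvF 0 xs ++ pvF 1 xs ++ pvF 2 xs ++ pvF 3 xs := by
  rw [PySem.List.sorted_eq_foldl_insertBy]
  induction xs using List.reverseRecOn with
  | nil => simp [pvF]
  | append_singleton xs x ih =>
    rw [List.foldl_append, List.foldl_cons, List.foldl_nil, ih]
    rcases pvClassify_range x with hx | hx | hx | hx
    · have e : pvF 0 xs ++ pvF 1 xs ++ pvF 2 xs ++ pvF 3 xs
             = pvF 0 xs ++ (pvF 1 xs ++ pvF 2 xs ++ pvF 3 xs) := by simp [List.append_assoc]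
      have h1 : ∀ a ∈ pvF 0 xs, (decide (pvClassify x < pvClassify a)) = false := by
        intro a ha; have := mem_pvF 0 xs a ha; simp [this, hx]
      have h2 : ∀ b ∈ pvF 1 xs ++ pvF 2 xs ++ pvF 3 xs,
          (decide (pvClassify x < pvClassify b)) = true := by
        intro b hb; simp only [List.mem_append, or_assoc] at hb
        rcases hb with hb | hb | hb <;> have := mem_pvF _ xs b hb <;> simp [this, hx]
      rw [e, pvInsertBy_split _ x _ _ h1 h2]
      simp [pvF, hx]
    · have e : pvF 0 xs ++ pvF 1 xs ++ pvF 2 xs ++ pvF 3 xs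
             = (pvF 0 xs ++ pvF 1 xs) ++ (pvF 2 xs ++ pvF 3 xs) := by simp [List.append_assoc]
      have h1 : ∀ a ∈ pvF 0 xs ++ pvF 1 xs, (decide (pvClassify x < pvClassify a)) = false := by
        intro a ha; simp only [List.mem_append] at ha
        rcases ha with ha | ha <;> have := mem_pvF _ xs a ha <;> simp [this, hx]
      have h2 : ∀ b ∈ pvF 2 xs ++ pvF 3 xs,
          (decide (pvClassify x < pvClassify b)) = true := by
        intro b hb; simp only [List.mem_append] at hb
        rcases hb with hb | hb <;> have := mem_pvF _ xs b hb <;> simp [this, hx]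
      rw [e, pvInsertBy_split _ x _ _ h1 h2]
      simp [pvF, hx]
    · have e : pvF 0 xs ++ pvF 1 xs ++ pvF 2 xs ++ pvF 3 xs
             = (pvF 0 xs ++ pvF 1 xs ++ pvF 2 xs) ++ pvF 3 xs := by simp [List.append_assoc]
      have h1 : ∀ a ∈ pvF 0 xs ++ pvF 1 xs ++ pvF 2 xs,
          (decide (pvClassify x < pvClassify a)) = false := by
        intro a ha; simp only [List.mem_append, or_assoc] at ha
        rcases ha with ha | ha | ha <;> have := mem_pvF _ xs a ha <;> simp [this, hx]
      have h2 : ∀ b ∈ pvF 3 xs, (decide (pvClassify x < pvClassify b)) = true := by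
        intro b hb; have := mem_pvF 3 xs b hb; simp [this, hx]
      rw [e, pvInsertBy_split _ x _ _ h1 h2]
      simp [pvF, hx]
    · have e : pvF 0 xs ++ pvF 1 xs ++ pvF 2 xs ++ pvF 3 xs
             = (pvF 0 xs ++ pvF 1 xs ++ pvF 2 xs ++ pvF 3 xs) ++ [] := by simp
      have h1 : ∀ a ∈ pvF 0 xs ++ pvF 1 xs ++ pvF 2 xs ++ pvF 3 xs,
          (decide (pvClassify x < pvClassify a)) = false := by
        intro a ha; simp only [List.mem_append, or_assoc] at ha
        rcases ha with ha | ha | ha | ha <;> have := mem_pvF _ xs a ha <;> simp [this, hx]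
      have h2 : ∀ b ∈ ([] : List (List (String × String))),
          (decide (pvClassify x < pvClassify b)) = true := by simp
      rw [e, pvInsertBy_split _ x _ _ h1 h2]
      simp [pvF, hx]

-- Pre_ says exactly that the proxy bucket is nonempty
theorem pvF0_ne_nil (outbounds : List (List (String × String)))
    (hpre : Pre_reorder_outbounds outbounds) : pvF 0 outbounds ≠ [] := by
  unfold Pre_reorder_outbounds at hpre
  rcases List.any_eq_true.mp hpre with ⟨o, ho, hc⟩
  intro hnil
  have : o ∈ pvF 0 outbounds := List.mem_filter.mpr ⟨ho, hc⟩
  simp [hnil] at this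

-- ===== VERDICT (by name: the statement is the Claim_ definition above) =====
theorem reorder_outbounds_spec : Claim_equal_reorder_outbounds := by
  intro outbounds _ hpre
  unfold Spec_reorder_outbounds reorder_outbounds reorder_outbounds_alt
  rw [pvA_loop outbounds [] [] [] []]
  simp only [List.nil_append]
  have hpre' : (outbounds.any fun o => pvClassify o == 0) = true := hpre
  rw [if_neg (pvF0_ne_nil outbounds hpre), if_pos hpre', pvSorted_eq_filters]
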